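-- pv_equiv track=rewrite | github.com/fstetler/Python-course | General exercises/Code_Wars.py | job1
-- ===== SOURCE A (Python) =====
-- def job1(A):
-- 	singleList = []
--
-- 	for i in A:
-- 		if i > -10 and i < 10:
-- 			singleList.append(i)
-- 	if len(singleList) > 0:
-- 		return max(singleList)
-- 	else:
-- 		return 'No value'
-- ===== SOURCE B (Python) =====
-- def job1(A):
--     best = None
--     for i in A:
--         if -10 < i < 10 and (best is None or i > best):
--             best = i
--     return best if best is not None else 'No value'
-- ===== Notes on version B (the rewrite author's own statement) =====
-- stated objective: simpler
-- what changed: Replaces the filter-into-a-list pass followed by a separate max scan with one pass keeping a running best scalar, no intermediate list.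
-- outside the precondition, e.g. on job1([]): A returns 'No value', B returns 'No value'; on job1([10, -10, 42]): A returns 'No value', B returns 'No value'
import Mathlib
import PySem

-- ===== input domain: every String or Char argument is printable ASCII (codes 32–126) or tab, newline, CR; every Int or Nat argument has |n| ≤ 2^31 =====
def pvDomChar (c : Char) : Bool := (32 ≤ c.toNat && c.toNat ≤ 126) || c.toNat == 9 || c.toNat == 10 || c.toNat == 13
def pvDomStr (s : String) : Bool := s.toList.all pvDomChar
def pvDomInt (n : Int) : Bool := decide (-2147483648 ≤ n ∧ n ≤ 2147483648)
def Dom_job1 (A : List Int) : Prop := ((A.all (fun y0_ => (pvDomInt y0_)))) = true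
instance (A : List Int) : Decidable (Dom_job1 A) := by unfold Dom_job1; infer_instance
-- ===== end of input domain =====

-- B replaces A's filter-into-a-list pass plus a separate max scan by one pass
-- keeping a running best scalar (objective: simpler, O(1) extra space).

-- ===== PORT A =====
-- filter loop appending to singleList, then max(singleList) if nonempty
def job1 (A : List Int) : Option Int :=
  let singleList := A.foldl (fun acc i => if i > -10 ∧ i < 10 then acc ++ [i] else acc) []
  if singleList.length > 0 then PySem.List.max? singleList (fun x => x)
  else none  -- Python returns the string 'No value' here: outside Pre_job1

-- ===== PORT B =====
-- single pass with a running best (pvStep is the loop body)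
def pvStep (best : Option Int) (i : Int) : Option Int :=
  if (-10 < i ∧ i < 10) ∧ (best = none ∨ (∃ b, best = some b ∧ i > b)) then some i
  else best

def job1_alt (A : List Int) : Option Int :=
  match A.foldl pvStep none with
  | some b => some b
  | none => none  -- Python returns the string 'No value' here: outside Pre_job1

-- ===== PRECONDITION & SPEC =====
-- Pre_ excludes inputs with no element strictly between -10 and 10: there both
-- Pythons return the STRING 'No value', which is no value of the declared Option Int type.
def Pre_job1 (A : List Int) : Prop := (A.any (fun i => -10 < i ∧ i < 10)) = true
instance (A : List Int) : Decidable (Pre_job1 A) := by unfold Pre_job1; infer_instance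
def pvWitness_job1 : List Int := [11, 3, -2]
def Spec_job1 (A : List Int) (out : Option Int) : Prop := out = job1_alt A
instance (A : List Int) (out : Option Int) : Decidable (Spec_job1 A out) := by unfold Spec_job1; infer_instance

-- ===== CLAIM (what is proved, stated in full; the proofs are below) =====
def Claim_equal_job1 : Prop := ∀ (A : List Int), Dom_job1 A → Pre_job1 A → Spec_job1 A (job1 A)

-- ===== LEMMAS AND PROOFS =====

-- running max as an explicit Option fold
def pvRmax (m : Option Int) (x : Int) : Option Int :=
  match m with
  | none => some x
  | some b => some (max b x)

def pvFilt (A : List Int) : List Int :=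
  A.foldl (fun acc i => if i > -10 ∧ i < 10 then acc ++ [i] else acc) []

theorem pvRmax_step (m : Option Int) (i : Int) (h : -10 < i ∧ i < 10) :
    pvRmax m i = pvStep m i := by
  cases m with
  | none => simp [pvRmax, pvStep, h.1, h.2]
  | some b =>
    by_cases hib : i > b
    · simp [pvRmax, pvStep, h.1, h.2, hib, le_of_lt hib]
    · simp only [pvRmax, pvStep]
      rw [if_neg]
      · rw [Option.some.injEq]; omega
      · rintro ⟨_, hc | ⟨b', hb', hib'⟩⟩
        · exact absurd hc (by simp)
        · rw [Option.some.injEq] at hb'; omega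

-- invariant: B's accumulator equals the running max of A's accumulated filtered list
theorem pv_invariant (A : List Int) : ∀ (acc : List Int),
    ((A.foldl (fun acc i => if i > -10 ∧ i < 10 then acc ++ [i] else acc) acc).foldl pvRmax none)
      = A.foldl pvStep (acc.foldl pvRmax none) := by
  induction A with
  | nil => intro acc; rfl
  | cons i t ih =>
    intro acc
    by_cases h : i > -10 ∧ i < 10
    · simp only [List.foldl_cons, if_pos h, ih, List.foldl_append, List.foldl_cons,
        List.foldl_nil]
      rw [pvRmax_step _ _ h]
    · simp only [List.foldl_cons, if_neg h, ih]
      congr 1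
      simp only [pvStep]
      rw [if_neg]
      rintro ⟨⟨h1, h2⟩, _⟩; exact h ⟨h1, h2⟩

theorem pv_foldl_rmax (t : List Int) (x : Int) :
    t.foldl pvRmax (some x) = some (t.foldl max x) := by
  induction t generalizing x with
  | nil => rfl
  | cons y u ih => simp [List.foldl_cons, pvRmax, ih]

theorem pv_max?_eq_fold (l : List Int) :
    PySem.List.max? l (fun x => x) = l.foldl pvRmax none := by
  cases l with
  | nil => rfl
  | cons x t => rw [PySem.List.max?_id_cons, List.foldl_cons, show pvRmax none x = some x from rfl, pv_foldl_rmax]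

theorem pv_filt_mem (A : List Int) (x : Int) (hx1 : -10 < x) (hx2 : x < 10) :
    ∀ (acc : List Int), x ∈ acc ∨ x ∈ A →
      x ∈ A.foldl (fun acc i => if i > -10 ∧ i < 10 then acc ++ [i] else acc) acc := by
  induction A with
  | nil => intro acc h; simpa using h
  | cons a t ih =>
    intro acc h
    simp only [List.foldl_cons]
    split_ifs with ha
    · rcases h with hacc | hA
      · exact ih _ (Or.inl (by simp [hacc]))
      · rcases List.mem_cons.mp hA with rfl | ht
        · exact ih _ (Or.inl (by simp))
        · exact ih _ (Or.inr ht)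
    · rcases h with hacc | hA
      · exact ih _ (Or.inl hacc)
      · rcases List.mem_cons.mp hA with rfl | ht
        · exact absurd ⟨hx1, hx2⟩ ha
        · exact ih _ (Or.inr ht)

-- ===== VERDICT (by name: the statement is the Claim_ definition above) =====
theorem job1_spec : Claim_equal_job1 := by
  intro A _ hpre
  unfold Spec_job1 job1 job1_alt
  simp only []
  have hne : (A.foldl (fun acc i => if i > -10 ∧ i < 10 then acc ++ [i] else acc) []) ≠ [] := by
    unfold Pre_job1 at hpre
    simp only [List.any_eq_true, decide_eq_true_eq] at hpre
    obtain ⟨x, hx, hx1, hx2⟩ := hpre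
    intro hempty
    have := pv_filt_mem A x hx1 hx2 [] (Or.inr hx)
    rw [hempty] at this
    exact absurd this (List.not_mem_nil)
  rw [if_pos (by
    cases h : (A.foldl (fun acc i => if i > -10 ∧ i < 10 then acc ++ [i] else acc) []) with
    | nil => exact absurd h hne
    | cons a t => exact Nat.succ_pos _)]
  rw [pv_max?_eq_fold]
  have key := pv_invariant A []
  simp only [List.foldl_nil] at key
  rw [key]
  cases A.foldl pvStep none with
  | none => rfl
  | some b => rfl
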